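-- pv_equiv track=rewrite | github.com/wan-catherine/Leetcode | problems/N1504_Count_Submatrices_With_All_Ones.py | count_one_row
-- ===== SOURCE A (Python) =====
-- def count_one_row(arr):
--     res = 0
--     count = 0
--     for i in arr:
--         if i == 0:
--             count = 0
--         else:
--             count += 1
--         res += count
--     return res
-- ===== SOURCE B (Python) =====
-- def count_one_row(arr):
--     res = 0
--     run = 0
--     for i in arr:
--         if i == 0:
--             res += run * (run + 1) // 2
--             run = 0
--         else:
--             run += 1
--     res += run * (run + 1) // 2
--     return res
-- ===== Notes on version B (the rewrite author's own statement) =====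
-- stated objective: alternative
-- what changed: B accumulates nothing per element: it tracks maximal runs of nonzero values and adds the closed-form triangular number L*(L+1)//2 once per finished run (flushing the trailing run), instead of A's per-position running-count addition.
import Mathlib
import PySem

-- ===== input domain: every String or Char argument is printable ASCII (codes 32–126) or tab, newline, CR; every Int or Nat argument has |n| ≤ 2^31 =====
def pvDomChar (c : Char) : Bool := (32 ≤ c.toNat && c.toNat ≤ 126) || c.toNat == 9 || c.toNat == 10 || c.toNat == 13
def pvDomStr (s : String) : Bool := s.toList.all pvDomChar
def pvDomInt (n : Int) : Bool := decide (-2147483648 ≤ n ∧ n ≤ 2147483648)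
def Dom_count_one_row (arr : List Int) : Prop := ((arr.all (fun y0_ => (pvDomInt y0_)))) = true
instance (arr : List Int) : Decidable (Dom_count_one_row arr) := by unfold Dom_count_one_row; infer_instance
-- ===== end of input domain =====

-- B replaces A's per-element running-count accumulation by a per-run closed-form
-- triangular-number contribution (objective: alternative; same O(n) cost).

-- ===== PORT A =====
-- A's loop over arr with state (res, count), step for step.
def countOneRowGoA (arr : List Int) (res count : Int) : Int :=
  match arr with
  | [] => res
  | i :: t =>
      let count' := if i = 0 then 0 else count + 1
      countOneRowGoA t (res + count') count'

def count_one_row (arr : List Int) : Int := countOneRowGoA arr 0 0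

-- ===== PORT B =====
-- B's loop over arr with state (res, run); a finished run of length L contributes L*(L+1)//2.
def countOneRowGoB (arr : List Int) (res run : Int) : Int :=
  match arr with
  | [] => res + PySem.Int.floordiv (run * (run + 1)) 2
  | i :: t =>
      if i = 0 then countOneRowGoB t (res + PySem.Int.floordiv (run * (run + 1)) 2) 0
      else countOneRowGoB t res (run + 1)

def count_one_row_alt (arr : List Int) : Int := countOneRowGoB arr 0 0

-- ===== PRECONDITION & SPEC =====
def Spec_count_one_row (arr : List Int) (out : Int) : Prop := out = count_one_row_alt arr
instance (arr : List Int) (out : Int) : Decidable (Spec_count_one_row arr out) := by unfold Spec_count_one_row; infer_instance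

-- ===== CLAIM (what is proved, stated in full; the proofs are below) =====
def Claim_equal_count_one_row : Prop := ∀ (arr : List Int), Dom_count_one_row arr → Spec_count_one_row arr (count_one_row arr)

-- ===== LEMMAS AND PROOFS =====
-- triangular-number step: T(r+1) = T(r) + (r+1), where T(r) = r*(r+1)//2
theorem countOneRow_tri_step (r : Int) :
    PySem.Int.floordiv ((r + 1) * (r + 1 + 1)) 2
      = PySem.Int.floordiv (r * (r + 1)) 2 + (r + 1) := by
  have h : (r + 1) * (r + 1 + 1) = r * (r + 1) + (r + 1) * 2 := by ring
  rw [h, PySem.Int.floordiv, Int.add_mul_fdiv_right _ _ (by norm_num), PySem.Int.floordiv]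

-- invariant: A's state carries the current run's triangle already added, B's does not
theorem countOneRowGo_eq (arr : List Int) :
    ∀ res r : Int,
      countOneRowGoA arr (res + PySem.Int.floordiv (r * (r + 1)) 2) r = countOneRowGoB arr res r := by
  induction arr with
  | nil => intro res r; simp [countOneRowGoA, countOneRowGoB]
  | cons i t ih =>
      intro res r
      by_cases h : i = 0
      · simp only [countOneRowGoA, countOneRowGoB, h]
        have := ih (res + PySem.Int.floordiv (r * (r + 1)) 2) 0
        simpa [PySem.Int.floordiv] using this
      · simp only [countOneRowGoA, countOneRowGoB, if_neg h]
        have := ih res (r + 1)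
        rw [countOneRow_tri_step] at this
        rw [add_assoc]
        exact this

-- ===== VERDICT (by name: the statement is the Claim_ definition above) =====
theorem count_one_row_spec : Claim_equal_count_one_row := by
  intro arr _
  unfold Spec_count_one_row count_one_row count_one_row_alt
  have := countOneRowGo_eq arr 0 0
  simpa [PySem.Int.floordiv] using this
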